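-- pv_equiv track=rewrite | github.com/darc33/HackerRank_prepkit_py | test2.py | getFinalOrder
-- ===== SOURCE A (Python) =====
-- def getFinalOrder(k, amount):
--     wdw_order=list()#[0]*len(amount)
--     x_tuple=list(map(list, zip(list(range(1,len(amount)+1)), amount)))
--     while x_tuple:
--         if x_tuple[0][1]<=k:
--             wdw_order.append(x_tuple[0][0])
--             x_tuple.pop(0)
--         else:
--             x_tuple[0][1]-=k
--             x_tuple.append(x_tuple.pop(0))
--
--     return wdw_order
-- ===== SOURCE B (Python) =====
-- def getFinalOrder(k, amount):
--     # Each customer i needs rounds(amount[i]) passes through the queue; the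
--     # finish order is a stable sort of the customers by that round count.
--     def rounds(a):
--         return 1 if a <= k else -(-a // k)
--     return sorted(range(1, len(amount) + 1), key=lambda i: rounds(amount[i - 1]))
-- ===== Notes on version B (the rewrite author's own statement) =====
-- stated objective: faster
-- what changed: A simulates the round-robin queue pass by pass (pop/requeue until every amount is served); B computes each customer's round count ceil(amount/k) in closed form and stable-sorts the indices by it.
import Mathlib
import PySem

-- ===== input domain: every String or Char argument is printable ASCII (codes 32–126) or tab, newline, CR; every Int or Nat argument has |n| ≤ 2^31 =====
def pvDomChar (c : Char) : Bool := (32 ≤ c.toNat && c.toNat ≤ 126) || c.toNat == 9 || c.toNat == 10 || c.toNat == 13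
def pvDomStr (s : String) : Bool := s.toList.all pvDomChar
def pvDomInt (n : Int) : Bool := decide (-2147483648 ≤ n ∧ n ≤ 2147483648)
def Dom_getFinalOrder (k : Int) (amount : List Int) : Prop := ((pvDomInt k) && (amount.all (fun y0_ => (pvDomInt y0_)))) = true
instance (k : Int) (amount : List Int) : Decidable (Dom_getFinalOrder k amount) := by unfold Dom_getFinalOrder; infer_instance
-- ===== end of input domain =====

-- B replaces A's round-robin queue simulation by a stable sort of the customer
-- indices by their number of service rounds ceil(amount/k) (asymptotically faster).

-- Number of passes element with remaining amount a still needs (1 if a ≤ k, else ceil(a/k)).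
-- Used as B's sort key and as the termination measure of A's loop.
def pvRounds (k a : Int) : Int := if a ≤ k then 1 else -(PySem.Int.floordiv (-a) k)

-- arithmetic facts cited by the ports' termination proofs
theorem pvRounds_sub (k a : Int) (hk : 0 < k) (ha : k < a) :
    pvRounds k (a - k) = pvRounds k a - 1 ∧ 2 ≤ pvRounds k a := by
  have hna : ¬ a ≤ k := not_le.mpr ha
  have hc : -(PySem.Int.floordiv (-a) k) = -(PySem.Int.floordiv (-a) k) := rfl
  obtain ⟨h1, h2⟩ := (PySem.Int.neg_floordiv_neg_eq_iff_of_pos hk).mp hc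
  set c := -(PySem.Int.floordiv (-a) k) with hcdef
  have h2c : 2 ≤ c := by nlinarith
  have hra : pvRounds k a = c := by simp [pvRounds, hna, hcdef]
  refine ⟨?_, by omega⟩
  unfold pvRounds
  rw [if_neg hna]
  by_cases hak : a - k ≤ k
  · rw [if_pos hak]
    have : c = 2 := by
      rw [hcdef, PySem.Int.neg_floordiv_neg_eq_iff_of_pos hk]
      constructor <;> nlinarith
    omega
  · rw [if_neg hak, ← hcdef, PySem.Int.neg_floordiv_neg_eq_iff_of_pos hk]
    have e1 : (c - 1 - 1) * k = (c - 1) * k - k := by ring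
    have e2 : (c - 1) * k = c * k - k := by ring
    omega

theorem pvRounds_one {k a : Int} (h : a ≤ k) : pvRounds k a = 1 := by simp [pvRounds, h]

-- ===== PORT A =====
-- the while-loop over x_tuple (queue of [index, remaining]); wdw_order is acc.
-- 'else acc' is a totality guard only: there Python's loop never terminates
-- (amount entries stay > k while k ≤ 0), excluded by Pre_getFinalOrder.
def getFinalOrderLoop (k : Int) (xt : List (Int × Int)) (acc : List Int) : List Int :=
  match xt with
  | [] => acc
  | (i, a) :: rest =>
    if a ≤ k then getFinalOrderLoop k rest (acc ++ [i])
    else if 0 < k then getFinalOrderLoop k (rest ++ [(i, a - k)]) acc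
    else acc
termination_by (xt.map (fun p => (pvRounds k p.2).toNat)).sum
decreasing_by
  · simp only [List.map_cons, List.sum_cons]
    have : pvRounds k a = 1 := pvRounds_one (by assumption)
    simp [this]
  · rename_i hle hk
    obtain ⟨hsub, h2⟩ := pvRounds_sub k a hk (not_le.mp hle)
    simp only [List.map_append, List.sum_append, List.map_cons, List.sum_cons,
      List.map_nil, List.sum_nil, hsub]
    omega

def getFinalOrder (k : Int) (amount : List Int) : List Int :=
  getFinalOrderLoop k ((PySem.List.pyRange 1 ((amount.length : Int) + 1) 1).zip amount) []

-- ===== PORT B =====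
-- stable sort of the indices 1..n by pvRounds of their amount (amount[i-1]
-- is always in range for i in range(1, n+1), so pyGetD is exact here)
def getFinalOrder_alt (k : Int) (amount : List Int) : List Int :=
  PySem.List.sorted (PySem.List.pyRange 1 ((amount.length : Int) + 1) 1)
    (fun i => pvRounds k (PySem.List.pyGetD amount (i - 1) 0)) false

-- ===== PRECONDITION & SPEC =====
-- Pre_ excludes exactly the inputs where A's while-loop never terminates:
-- k ≤ 0 with some amount entry > k (the queue entry is never served down to ≤ k).
def Pre_getFinalOrder (k : Int) (amount : List Int) : Prop :=
  0 < k ∨ ∀ a ∈ amount, a ≤ k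
instance (k : Int) (amount : List Int) : Decidable (Pre_getFinalOrder k amount) := by
  unfold Pre_getFinalOrder; infer_instance

def pvWitness_getFinalOrder : Int × List Int := (2, [5, 1, 3])

def Spec_getFinalOrder (k : Int) (amount : List Int) (out : List Int) : Prop := out = getFinalOrder_alt k amount
instance (k : Int) (amount : List Int) (out : List Int) : Decidable (Spec_getFinalOrder k amount out) := by unfold Spec_getFinalOrder; infer_instance

-- ===== CLAIM (what is proved, stated in full; the proofs are below) =====
def Claim_equal_getFinalOrder : Prop := ∀ (k : Int) (amount : List Int), Dom_getFinalOrder k amount → Pre_getFinalOrder k amount → Spec_getFinalOrder k amount (getFinalOrder k amount)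

-- ===== LEMMAS AND PROOFS =====

theorem pvRounds_pos {k a : Int} (h : 0 < k ∨ a ≤ k) : 1 ≤ pvRounds k a := by
  by_cases hak : a ≤ k
  · simp [pvRounds_one hak]
  · rcases h with hk | hk
    · have := (pvRounds_sub k a hk (not_le.mp hak)).2; omega
    · exact absurd hk hak

-- acc-free version of A's loop, for the proofs
def pvG (k : Int) (xt : List (Int × Int)) : List Int :=
  match xt with
  | [] => []
  | (i, a) :: rest =>
    if a ≤ k then i :: pvG k rest
    else if 0 < k then pvG k (rest ++ [(i, a - k)])
    else []
termination_by (xt.map (fun p => (pvRounds k p.2).toNat)).sum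
decreasing_by
  · simp only [List.map_cons, List.sum_cons]
    have : pvRounds k a = 1 := pvRounds_one (by assumption)
    simp [this]
  · rename_i hle hk
    obtain ⟨hsub, h2⟩ := pvRounds_sub k a hk (not_le.mp hle)
    simp only [List.map_append, List.sum_append, List.map_cons, List.sum_cons,
      List.map_nil, List.sum_nil, hsub]
    omega

theorem loop_eq_pvG (k : Int) (xt : List (Int × Int)) :
    ∀ acc, getFinalOrderLoop k xt acc = acc ++ pvG k xt := by
  induction xt using pvG.induct (k := k) with
  | case1 => intro acc; simp [getFinalOrderLoop, pvG]
  | case2 i a rest hle ih =>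
    intro acc
    simp only [getFinalOrderLoop, pvG, if_pos hle, ih]
    simp
  | case3 i a rest hle hk ih =>
    intro acc
    simp only [getFinalOrderLoop, pvG, if_neg hle, if_pos hk, ih]
  | case4 i a rest hle hk =>
    intro acc
    simp [getFinalOrderLoop, pvG, if_neg hle, if_neg hk]

-- output order of B: strictly increasing key, ties in increasing index order
def pvOrd (K : Int → Int) (i j : Int) : Prop := K i < K j ∨ (K i = K j ∧ i < j)

-- queue invariant: along the queue the "completed passes" d = K idx - pvRounds k amt
-- grows by at most one, with index order inside each of the two segments
def pvQ (K : Int → Int) (k : Int) (p q : Int × Int) : Prop :=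
  K p.1 - pvRounds k p.2 ≤ K q.1 - pvRounds k q.2 ∧
  K q.1 - pvRounds k q.2 ≤ K p.1 - pvRounds k p.2 + 1 ∧
  (K p.1 - pvRounds k p.2 = K q.1 - pvRounds k q.2 → p.1 < q.1) ∧
  (K q.1 - pvRounds k q.2 = K p.1 - pvRounds k p.2 + 1 → q.1 < p.1)

theorem pvG_spec (K : Int → Int) : ∀ (k : Int) (xt : List (Int × Int)),
    (0 < k ∨ ∀ p ∈ xt, p.2 ≤ k) →
    (∀ p ∈ xt, 0 ≤ K p.1 - pvRounds k p.2) →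
    xt.Pairwise (pvQ K k) →
    (pvG k xt).Perm (xt.map Prod.fst) ∧ (pvG k xt).Pairwise (pvOrd K) := by
  intro k xt
  induction xt using pvG.induct (k := k) with
  | case1 => intro _ _ _; simp [pvG]
  | case2 i a rest hle ih =>
    intro hk hD hpw
    obtain ⟨hQhead, hpwrest⟩ := List.pairwise_cons.mp hpw
    have hk' : 0 < k ∨ ∀ p ∈ rest, p.2 ≤ k :=
      hk.imp id (fun h p hp => h p (List.mem_cons_of_mem _ hp))
    have hD' : ∀ p ∈ rest, 0 ≤ K p.1 - pvRounds k p.2 :=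
      fun p hp => hD p (List.mem_cons_of_mem _ hp)
    obtain ⟨hperm, hpair⟩ := ih hk' hD' hpwrest
    have hGeq : pvG k ((i, a) :: rest) = i :: pvG k rest := by simp [pvG, hle]
    rw [hGeq]
    refine ⟨by simpa using hperm.cons i, List.Pairwise.cons ?_ hpair⟩
    intro j hj
    obtain ⟨q, hq, rfl⟩ := List.mem_map.mp (hperm.mem_iff.mp hj)
    have hQ := hQhead q hq
    simp only [pvQ] at hQ
    obtain ⟨h1, h2, h3, h4⟩ := hQ
    have hcur_i : pvRounds k a = 1 := pvRounds_one hle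
    have hcur_q : 1 ≤ pvRounds k q.2 :=
      pvRounds_pos (hk.imp id (fun h => h q (List.mem_cons_of_mem _ hq)))
    rw [hcur_i] at h1 h2 h3 h4
    by_cases he : K i - 1 = K q.1 - pvRounds k q.2
    · have hi := h3 he
      rcases (by omega : K i < K q.1 ∨ K i = K q.1) with h | h
      · exact Or.inl h
      · exact Or.inr ⟨h, hi⟩
    · exact Or.inl (by omega)
  | case3 i a rest hle hk0 ih =>
    intro hk hD hpw
    obtain ⟨hsub, h2c⟩ := pvRounds_sub k a hk0 (not_le.mp hle)
    obtain ⟨hQhead, hpwrest⟩ := List.pairwise_cons.mp hpw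
    have hDhead : 0 ≤ K i - pvRounds k a := hD (i, a) List.mem_cons_self
    have hk' : 0 < k ∨ ∀ p ∈ rest ++ [(i, a - k)], p.2 ≤ k := Or.inl hk0
    have hD' : ∀ p ∈ rest ++ [(i, a - k)], 0 ≤ K p.1 - pvRounds k p.2 := by
      intro p hp
      rcases List.mem_append.mp hp with hp | hp
      · exact hD p (List.mem_cons_of_mem _ hp)
      · simp only [List.mem_singleton] at hp; subst hp
        show 0 ≤ K i - pvRounds k (a - k)
        rw [hsub]; omega
    have hpw' : (rest ++ [(i, a - k)]).Pairwise (pvQ K k) := by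
      rw [List.pairwise_append]
      refine ⟨hpwrest, List.pairwise_singleton _ _, ?_⟩
      intro p hp x hx
      simp only [List.mem_singleton] at hx; subst hx
      have hQ := hQhead p hp
      simp only [pvQ] at hQ ⊢
      obtain ⟨h1, h2, h3, h4⟩ := hQ
      rw [hsub]
      exact ⟨by omega, by omega, fun he => h4 (by omega), fun he => h3 (by omega)⟩
    obtain ⟨hperm, hpair⟩ := ih hk' hD' hpw'
    have hGeq : pvG k ((i, a) :: rest) = pvG k (rest ++ [(i, a - k)]) := by
      simp [pvG, hle, hk0]
    rw [hGeq]
    refine ⟨?_, hpair⟩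
    have hmap : ((rest ++ [(i, a - k)]).map Prod.fst) = rest.map Prod.fst ++ [i] := by simp
    rw [hmap] at hperm
    simp only [List.map_cons]
    exact hperm.trans (List.perm_append_singleton i (rest.map Prod.fst))
  | case4 i a rest hle hk0 =>
    intro hk _ _
    rcases hk with h | h
    · exact absurd h hk0
    · exact absurd (h (i, a) List.mem_cons_self) hle

theorem insertBy_stable (key : Int → Int) (x : Int) :
    ∀ acc : List Int, acc.Pairwise (pvOrd key) → (∀ y ∈ acc, key y = key x → y < x) →
    (PySem.List.insertBy (fun a b => decide (key a < key b)) x acc).Pairwise (pvOrd key) := by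
  intro acc
  induction acc with
  | nil => intro _ _; simp [PySem.List.insertBy]
  | cons y ys ih =>
    intro hacc hx
    by_cases hlt : key x < key y
    · simp only [PySem.List.insertBy, hlt, decide_true, if_true]
      refine List.Pairwise.cons ?_ hacc
      intro z hz
      rcases List.mem_cons.mp hz with rfl | hzys
      · exact Or.inl hlt
      · rcases (List.pairwise_cons.mp hacc).1 z hzys with h | ⟨h, _⟩
        · exact Or.inl (lt_trans hlt h)
        · exact Or.inl (h ▸ hlt)
    · simp only [PySem.List.insertBy, hlt, decide_false]
      refine List.Pairwise.cons ?_ (ih (List.pairwise_cons.mp hacc).2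
        (fun y' hy' he => hx y' (List.mem_cons_of_mem _ hy') he))
      intro z hz
      rcases (PySem.List.mem_insertBy _ x z ys).mp hz with rfl | hzys
      · rcases lt_or_eq_of_le (not_lt.mp hlt) with h | h
        · exact Or.inl h
        · exact Or.inr ⟨h, hx y List.mem_cons_self h⟩
      · exact (List.pairwise_cons.mp hacc).1 z hzys

theorem foldl_insertBy_stable (key : Int → Int) :
    ∀ (xs acc : List Int), xs.Pairwise (· < ·) → acc.Pairwise (pvOrd key) →
    (∀ x ∈ xs, ∀ y ∈ acc, key y = key x → y < x) →
    (xs.foldl (fun acc x => PySem.List.insertBy (fun a b => decide (key a < key b)) x acc) acc).Pairwise (pvOrd key) := by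
  intro xs
  induction xs with
  | nil => intro acc _ h _; simpa using h
  | cons x xs ih =>
    intro acc hxs hacc hcross
    simp only [List.foldl_cons]
    refine ih _ (List.pairwise_cons.mp hxs).2
      (insertBy_stable key x acc hacc (fun y hy he => hcross x List.mem_cons_self y hy he)) ?_
    intro x' hx' y hy he
    rcases (PySem.List.mem_insertBy _ x y acc).mp hy with rfl | hyacc
    · exact (List.pairwise_cons.mp hxs).1 x' hx'
    · exact hcross x' (List.mem_cons_of_mem _ hx') y hyacc he

theorem sorted_stable (key : Int → Int) (xs : List Int) (hxs : xs.Pairwise (· < ·)) :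
    (PySem.List.sorted xs key false).Pairwise (pvOrd key) := by
  rw [PySem.List.sorted_eq_foldl_insertBy]
  exact foldl_insertBy_stable key xs [] hxs (by simp) (by simp)

-- ===== VERDICT (by name: the statement is the Claim_ definition above) =====
theorem getFinalOrder_spec : Claim_equal_getFinalOrder := by
  intro k amount _hdom hpre
  unfold Spec_getFinalOrder getFinalOrder getFinalOrder_alt
  set K : Int → Int := fun i => pvRounds k (PySem.List.pyGetD amount (i - 1) 0) with hK
  set idxs := PySem.List.pyRange 1 ((amount.length : Int) + 1) 1 with hidxs
  set s0 := idxs.zip amount with hs0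
  have hlen : idxs.length = amount.length := by
    rw [hidxs, PySem.List.length_pyRange_one]; omega
  have hfst : s0.map Prod.fst = idxs := List.map_fst_zip (le_of_eq hlen)
  have hkey : ∀ m (hm : m < s0.length), K (s0[m].1) = pvRounds k (s0[m].2) ∧
      s0[m].1 = 1 + (m : Int) := by
    intro m hm
    have hm2 : m < amount.length := by
      have := hm; rw [hs0, List.length_zip, hlen] at this; omega
    have hm1 : m < idxs.length := by omega
    have hz : s0[m] = (idxs[m], amount[m]) := by
      simp only [hs0]; exact List.getElem_zip
    have hidx : idxs[m] = 1 + (m : Int) := by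
      simp only [hidxs]; exact PySem.List.getElem_pyRange_one 1 _ m (by rwa [← hidxs])
    rw [hz, hidx]
    refine ⟨?_, rfl⟩
    have hc : (1 : Int) + (m : Int) - 1 = ((m : Nat) : Int) := by omega
    simp only [hK, hc, PySem.List.pyGetD_natCast, List.getD_eq_getElem amount 0 hm2]
  have hD : ∀ p ∈ s0, 0 ≤ K p.1 - pvRounds k p.2 := by
    intro p hp
    obtain ⟨m, hm, rfl⟩ := List.mem_iff_getElem.mp hp
    have := (hkey m hm).1
    omega
  have hk2 : 0 < k ∨ ∀ p ∈ s0, p.2 ≤ k := by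
    refine hpre.imp id (fun h p hp => ?_)
    obtain ⟨x, y⟩ := p
    exact h y (List.of_mem_zip hp).2
  have hpw : s0.Pairwise (pvQ K k) := by
    rw [List.pairwise_iff_getElem]
    intro m n hm hn hmn
    obtain ⟨e1m, e2m⟩ := hkey m hm
    obtain ⟨e1n, e2n⟩ := hkey n hn
    simp only [pvQ]
    refine ⟨by omega, by omega, fun _ => ?_, fun hcon => absurd hcon (by omega)⟩
    rw [e2m, e2n]; omega
  obtain ⟨hpermA, hpairA⟩ := pvG_spec K k s0 hk2 hD hpw
  have hA : getFinalOrderLoop k s0 [] = pvG k s0 := by simpa using loop_eq_pvG k s0 []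
  rw [hA]
  have hpermA' : (pvG k s0).Perm idxs := hfst ▸ hpermA
  have hpairB : (PySem.List.sorted idxs K false).Pairwise (pvOrd K) :=
    sorted_stable K idxs (by rw [hidxs]; exact PySem.List.pairwise_lt_pyRange_one 1 _)
  have hpermB : (PySem.List.sorted idxs K false).Perm idxs := PySem.List.sorted_perm idxs K false
  refine List.Perm.eq_of_pairwise (le := pvOrd K) ?_ hpairA hpairB (hpermA'.trans hpermB.symm)
  intro a b _ _ h1 h2
  rcases h1 with h | ⟨h, h'⟩ <;> rcases h2 with g | ⟨g, g'⟩ <;> omega
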